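-- pv_equiv track=rewrite | github.com/Salvodif/TomeTrove | tools/populate_from_directory.py | generate_standardized_filename
-- ===== SOURCE A (Python) =====
-- def generate_standardized_filename(title: str, author: str) -> str:
--     """
--     Generates a standardized filename from a title and author.
--     Format: "Sanitized Title - Sanitized Author.pdf"
--     """
--
--     invalid_chars = r'/\?%*:|"<>' # Characters invalid in many filesystems
--
--     def _sanitize_component(text: str) -> str:
--         if not text:
--             return ""
--         # Replace invalid characters with an underscore
--         for char in invalid_chars:
--             text = text.replace(char, '_')
--
--         # Replace sequences of whitespace with a single space
--         text = ' '.join(text.split())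
--
--         # Strip leading/trailing whitespace (though ' '.join(text.split()) also handles this)
--         text = text.strip()
--         return text
--
--     sanitized_title = _sanitize_component(title)
--     sanitized_author = _sanitize_component(author)
--
--     if not sanitized_title:
--         sanitized_title = "Unknown Title"
--     if not sanitized_author:
--         sanitized_author = "Unknown Author"
--
--     return f"{sanitized_title} - {sanitized_author}.pdf"
-- ===== SOURCE B (Python) =====
-- def generate_standardized_filename(title: str, author: str) -> str:
--     invalid = set('/\\?%*:|"<>')
--
--     def _clean(text: str) -> str:
--         # single pass: replace invalid chars, collapse/strip whitespace
--         out = []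
--         pending = False
--         for ch in text:
--             if ch in invalid:
--                 ch = '_'
--             if ch.isspace():
--                 pending = True
--             else:
--                 if pending and out:
--                     out.append(' ')
--                 out.append(ch)
--                 pending = False
--         return ''.join(out)
--
--     t = _clean(title) or "Unknown Title"
--     a = _clean(author) or "Unknown Author"
--     return f"{t} - {a}.pdf"
-- ===== Notes on version B (the rewrite author's own statement) =====
-- stated objective: alternative
-- what changed: Replaces A's three-pass sanitizer (ten replace() passes, then split()/join(), then strip()) with one single-pass scanner that maps invalid chars to '_' and collapses/strips whitespace via a pending-space flag.
import Mathlib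
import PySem

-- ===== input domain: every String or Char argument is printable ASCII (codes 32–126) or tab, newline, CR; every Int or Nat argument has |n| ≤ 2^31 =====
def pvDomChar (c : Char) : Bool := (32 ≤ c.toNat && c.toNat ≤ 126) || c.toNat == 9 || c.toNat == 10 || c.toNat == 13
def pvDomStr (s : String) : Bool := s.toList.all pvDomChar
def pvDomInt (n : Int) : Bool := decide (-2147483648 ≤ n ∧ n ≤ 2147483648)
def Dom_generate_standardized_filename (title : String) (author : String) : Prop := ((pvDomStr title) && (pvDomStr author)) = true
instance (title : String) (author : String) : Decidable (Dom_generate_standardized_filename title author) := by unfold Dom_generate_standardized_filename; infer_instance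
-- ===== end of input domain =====

-- B replaces A's three-pass sanitizer (ten replace() passes, split/join, strip) by one
-- single-pass scanner with a pending-space flag; same return value, different decomposition.

-- ===== PORT A =====
-- _sanitize_component of A: ten replace passes, then ' '.join(text.split()), then strip
def pvSanitizeA (text : String) : String :=
  if text = "" then ""
  else
    let t1 := ("/\\?%*:|\"<>".toList).foldl
      (fun s c => PySem.Str.replace s (String.ofList [c]) "_") text
    let t2 := PySem.Str.join " " (PySem.Str.split₀ t1)
    PySem.Str.strip t2

def generate_standardized_filename (title : String) (author : String) : String :=
  let st := pvSanitizeA title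
  let sa := pvSanitizeA author
  let st' := if st = "" then "Unknown Title" else st
  let sa' := if sa = "" then "Unknown Author" else sa
  st' ++ " - " ++ sa' ++ ".pdf"

-- ===== PORT B =====
def pvInvalidSet : PySem.Set Char := PySem.Set.ofList "/\\?%*:|\"<>".toList

-- the single-pass scanner of Source B: out is the emitted chars, pending the whitespace flag
def pvCleanGo : List Char → List Char → Bool → List Char
  | [], out, _ => out
  | ch :: rest, out, pending =>
    let ch' := if ch ∈ pvInvalidSet then '_' else ch
    if PySem.Chars.isspace ch' = true then pvCleanGo rest out true
    else pvCleanGo rest ((if pending && !out.isEmpty then out ++ [' '] else out) ++ [ch']) false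

def pvCleanB (text : String) : String := String.ofList (pvCleanGo text.toList [] false)

def generate_standardized_filename_alt (title : String) (author : String) : String :=
  let t := pvCleanB title
  let a := pvCleanB author
  (if t = "" then "Unknown Title" else t) ++ " - " ++
    (if a = "" then "Unknown Author" else a) ++ ".pdf"

-- ===== PRECONDITION & SPEC =====
def Spec_generate_standardized_filename (title : String) (author : String) (out : String) : Prop := out = generate_standardized_filename_alt title author
instance (title : String) (author : String) (out : String) : Decidable (Spec_generate_standardized_filename title author out) := by unfold Spec_generate_standardized_filename; infer_instance

-- ===== CLAIM (what is proved, stated in full; the proofs are below) =====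
def Claim_equal_generate_standardized_filename : Prop := ∀ (title : String) (author : String), Dom_generate_standardized_filename title author → Spec_generate_standardized_filename title author (generate_standardized_filename title author)

-- ===== LEMMAS AND PROOFS =====

-- the invalid characters, as a plain list
def pvInvChars : List Char := "/\\?%*:|\"<>".toList

-- the per-character substitution the replace passes amount to
def pvSub (cs : List Char) (c : Char) : Char := if c ∈ cs then '_' else c

-- pvCleanGo with the substitution already applied to the input
def pvPureGo : List Char → List Char → Bool → List Char
  | [], out, _ => out
  | ch :: rest, out, pending =>
    if PySem.Chars.isspace ch = true then pvPureGo rest out true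
    else pvPureGo rest ((if pending && !out.isEmpty then out ++ [' '] else out) ++ [ch]) false

lemma pv_replace_go (a b : Char) :
    ∀ (l : List Char) (fuel : Nat) (acc : List Char), l.length ≤ fuel →
      PySem.Chars.replace.go [a] [b] fuel l acc
        = acc.reverse ++ l.map (fun c => if c = a then b else c) := by
  intro l
  induction l with
  | nil =>
      intro fuel acc _
      cases fuel <;> simp [PySem.Chars.replace.go]
  | cons c t ih =>
      intro fuel acc hle
      cases fuel with
      | zero => simp at hle
      | succ n =>
          have hlen : t.length ≤ n := by simpa using hle
          by_cases hc : a = c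
          · subst hc
            have hpre : List.isPrefixOf [a] (a :: t) = true := by
              simp [List.isPrefixOf]
            simp [PySem.Chars.replace.go, hpre, ih _ _ hlen]
          · have hpre : List.isPrefixOf [a] (c :: t) = false := by
              simp [List.isPrefixOf]; exact fun h => (hc h).elim
            have hc' : ¬ c = a := fun h => hc h.symm
            simp [PySem.Chars.replace.go, hpre, ih _ _ hlen, hc']

lemma pv_replace_single (s : List Char) (a b : Char) :
    PySem.Chars.replace s [a] [b] = s.map (fun c => if c = a then b else c) := by
  unfold PySem.Chars.replace
  simpa using pv_replace_go a b s s.length [] le_rfl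

lemma pv_foldl_replace (cs : List Char) (l : List Char) :
    cs.foldl (fun s c => PySem.Chars.replace s [c] ['_']) l = l.map (pvSub cs) := by
  induction cs generalizing l with
  | nil =>
      simp only [List.foldl_nil]
      have h0 : ∀ x ∈ l, pvSub [] x = x := fun x _ => by simp [pvSub]
      rw [List.map_congr_left h0, List.map_id']
  | cons c cs ih =>
      have hpt : ∀ x, pvSub cs (if x = c then '_' else x) = pvSub (c :: cs) x := by
        intro x
        by_cases hx : x = c
        · subst hx
          by_cases h : '_' ∈ cs <;> simp [pvSub, h]
        · simp [pvSub, hx]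
      calc (c :: cs).foldl (fun s c => PySem.Chars.replace s [c] ['_']) l
          = cs.foldl (fun s c => PySem.Chars.replace s [c] ['_'])
              (PySem.Chars.replace l [c] ['_']) := rfl
        _ = (l.map (fun x => if x = c then '_' else x)).map (pvSub cs) := by
              rw [pv_replace_single, ih]
        _ = l.map (pvSub (c :: cs)) := by
              rw [List.map_map]; exact List.map_congr_left (fun x _ => hpt x)

lemma pv_strfold (cs : List Char) (text : String) :
    (cs.foldl (fun s c => PySem.Str.replace s (String.ofList [c]) "_") text).toList
      = cs.foldl (fun l c => PySem.Chars.replace l [c] ['_']) text.toList := by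
  induction cs generalizing text with
  | nil => rfl
  | cons c cs ih =>
      have hu : ("_" : String).toList = ['_'] := by decide
      calc ((c :: cs).foldl (fun s c => PySem.Str.replace s (String.ofList [c]) "_") text).toList
          = (cs.foldl (fun s c => PySem.Str.replace s (String.ofList [c]) "_")
              (PySem.Str.replace text (String.ofList [c]) "_")).toList := rfl
        _ = cs.foldl (fun l c => PySem.Chars.replace l [c] ['_'])
              (PySem.Str.replace text (String.ofList [c]) "_").toList := ih _
        _ = (c :: cs).foldl (fun l c => PySem.Chars.replace l [c] ['_']) text.toList := by
              rw [PySem.Str.toList_replace, String.toList_ofList, hu]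
              rfl

lemma pv_join_concat (sep : List Char) (ws : List (List Char)) (w : List Char) :
    PySem.Chars.join sep (ws ++ [w])
      = if ws = [] then w else PySem.Chars.join sep ws ++ sep ++ w := by
  induction ws with
  | nil => simp [PySem.Chars.join_singleton]
  | cons x ws ih =>
      cases ws with
      | nil =>
          simp [PySem.Chars.join_cons_cons, PySem.Chars.join_singleton]
      | cons y ws' =>
          have h1 : (x :: y :: ws') ++ [w] = x :: ((y :: ws') ++ [w]) := rfl
          have h2 : (y :: ws') ++ [w] = y :: (ws' ++ [w]) := rfl
          rw [h1, h2, PySem.Chars.join_cons_cons, ← h2, ih]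
          simp [PySem.Chars.join_cons_cons, List.append_assoc]

lemma pv_join_ne_nil (w : List Char) (ws : List (List Char)) (hw : w ≠ []) :
    PySem.Chars.join [' '] (w :: ws) ≠ [] := by
  cases ws with
  | nil => simpa [PySem.Chars.join_singleton] using hw
  | cons y ws' => simp [PySem.Chars.join_cons_cons, hw]

lemma pv_scan_go_eq (l : List Char) :
    ∀ (cur : List Char) (acc : List (List Char)) (out : List Char) (pending : Bool),
      out = PySem.Chars.join [' '] (acc.reverse ++ if cur = [] then [] else [cur.reverse]) →
      (∀ w ∈ acc, w ≠ []) →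
      (cur ≠ [] → pending = false) →
      (cur = [] → pending = false → acc = []) →
      pvPureGo l out pending = PySem.Chars.join [' '] (PySem.Chars.split₀.go l cur acc) := by
  induction l with
  | nil =>
      intro cur acc out pending hout hacc _ _
      cases cur with
      | nil => simpa [pvPureGo, PySem.Chars.split₀.go] using hout
      | cons d ds =>
          simp only [pvPureGo, PySem.Chars.split₀.go]
          simp only [List.isEmpty_cons, List.reverse_cons]
          simpa using hout
  | cons ch rest ih =>
      intro cur acc out pending hout hacc hcur hstart
      by_cases hsp : PySem.Chars.isspace ch = true
      · -- whitespace: set pending, close the current word (if any)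
        cases cur with
        | nil =>
            rw [show pvPureGo (ch :: rest) out pending = pvPureGo rest out true by
                  simp [pvPureGo, hsp],
                show PySem.Chars.split₀.go (ch :: rest) [] acc
                      = PySem.Chars.split₀.go rest [] acc by
                  simp [PySem.Chars.split₀.go, hsp]]
            exact ih [] acc out true hout hacc (by simp) (by simp)
        | cons d ds =>
            rw [show pvPureGo (ch :: rest) out pending = pvPureGo rest out true by
                  simp [pvPureGo, hsp],
                show PySem.Chars.split₀.go (ch :: rest) (d :: ds) acc
                      = PySem.Chars.split₀.go rest [] ((d :: ds).reverse :: acc) by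
                  simp [PySem.Chars.split₀.go, hsp]]
            refine ih [] ((d :: ds).reverse :: acc) out true ?_ ?_ (by simp) (by simp)
            · simpa using hout
            · intro w hw
              rcases List.mem_cons.1 hw with h | h
              · subst h; simp
              · exact hacc w h
      · -- word character: emit (with a separator if pending and output nonempty)
        have hstep : pvPureGo (ch :: rest) out pending
            = pvPureGo rest ((if pending && !out.isEmpty then out ++ [' '] else out) ++ [ch]) false := by
          simp [pvPureGo, hsp]
        have hgo : PySem.Chars.split₀.go (ch :: rest) cur acc
            = PySem.Chars.split₀.go rest (ch :: cur) acc := by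
          simp [PySem.Chars.split₀.go, hsp]
        rw [hstep, hgo]
        refine ih (ch :: cur) acc _ false ?_ hacc (by simp) (by simp)
        -- remaining: the new out equals the join for state (ch :: cur, acc)
        rw [if_neg (List.cons_ne_nil ch cur)]
        cases cur with
        | cons d ds =>
            have hp : pending = false := hcur (List.cons_ne_nil d ds)
            subst hp
            have hif : (if (false && !out.isEmpty) = true then out ++ [' '] else out) = out := by
              simp
            have hout' : out = PySem.Chars.join [' '] (acc.reverse ++ [(d :: ds).reverse]) := by
              simpa using hout
            have hrev : (ch :: d :: ds).reverse = (d :: ds).reverse ++ [ch] := by simp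
            rw [hif, hout', hrev, pv_join_concat, pv_join_concat]
            by_cases haccr : acc.reverse = [] <;>
              simp [haccr, List.append_assoc]
        | nil =>
            have hout0 : out = PySem.Chars.join [' '] acc.reverse := by simpa using hout
            have hrev1 : (ch :: ([] : List Char)).reverse = [ch] := by simp
            rw [hrev1]
            cases hpend : pending with
            | false =>
                have hacc0 : acc = [] := hstart rfl hpend
                subst hacc0
                have hout1 : out = [] := by
                  simpa [PySem.Chars.join, List.intercalate] using hout0
                subst hout1
                simp [PySem.Chars.join_singleton]
            | true =>
                cases hac : acc.reverse with
                | nil =>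
                    have hout1 : out = [] := by
                      rw [hout0, hac]; decide
                    subst hout1
                    simp [PySem.Chars.join_singleton]
                | cons w ws =>
                    have hwacc : w ∈ acc := by
                      have : w ∈ acc.reverse := by rw [hac]; simp
                      simpa using this
                    have hwne : w ≠ [] := hacc w hwacc
                    have houtne : out ≠ [] := by
                      rw [hout0, hac]; exact pv_join_ne_nil w ws hwne
                    have hie : out.isEmpty = false := by
                      simpa [List.isEmpty_iff] using houtne
                    have hif : (if (true && !out.isEmpty) = true then out ++ [' '] else out)
                        = out ++ [' '] := by simp [hie]
                    rw [hif, hout0, hac, pv_join_concat,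
                      if_neg (List.cons_ne_nil w ws)]

-- B's scanner on raw input equals the pure scanner on the substituted input
lemma pv_clean_go_map (l : List Char) :
    ∀ (out : List Char) (pending : Bool),
      pvCleanGo l out pending = pvPureGo (l.map (pvSub pvInvChars)) out pending := by
  induction l with
  | nil => intro out pending; rfl
  | cons c t ih =>
      intro out pending
      have hmem : (c ∈ pvInvalidSet) ↔ (c ∈ pvInvChars) := by
        unfold pvInvalidSet pvInvChars
        exact PySem.Set.mem_ofList _ _
      have hch : (if c ∈ pvInvalidSet then '_' else c) = pvSub pvInvChars c := by
        unfold pvSub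
        by_cases h : c ∈ pvInvChars
        · rw [if_pos (hmem.2 h), if_pos h]
        · rw [if_neg (fun hc => h (hmem.1 hc)), if_neg h]
      show (if PySem.Chars.isspace (if c ∈ pvInvalidSet then '_' else c) = true
              then pvCleanGo t out true
              else pvCleanGo t ((if pending && !out.isEmpty then out ++ [' '] else out)
                ++ [if c ∈ pvInvalidSet then '_' else c]) false)
          = pvPureGo (pvSub pvInvChars c :: t.map (pvSub pvInvChars)) out pending
      rw [hch]
      by_cases hsp : PySem.Chars.isspace (pvSub pvInvChars c) = true
      · simp only [pvPureGo, hsp, ih]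
      · simp only [pvPureGo, hsp, ih]

-- the scanner's output never starts or ends with whitespace
def pvEndsOk (out : List Char) : Prop :=
  (∀ c ∈ out.head?, PySem.Chars.isspace c = false) ∧
  (∀ c ∈ out.getLast?, PySem.Chars.isspace c = false)

lemma pv_pure_ends (l : List Char) :
    ∀ (out : List Char) (pending : Bool), pvEndsOk out → pvEndsOk (pvPureGo l out pending) := by
  induction l with
  | nil => intro out pending h; exact h
  | cons ch rest ih =>
      intro out pending h
      by_cases hsp : PySem.Chars.isspace ch = true
      · rw [show pvPureGo (ch :: rest) out pending = pvPureGo rest out true by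
            simp [pvPureGo, hsp]]
        exact ih out true h
      · have hsp' : PySem.Chars.isspace ch = false := by
          cases hb : PySem.Chars.isspace ch
          · rfl
          · exact absurd hb hsp
        rw [show pvPureGo (ch :: rest) out pending
              = pvPureGo rest ((if pending && !out.isEmpty then out ++ [' '] else out) ++ [ch]) false by
            simp [pvPureGo, hsp]]
        refine ih _ false ⟨?_, ?_⟩
        · intro c hc
          by_cases hcond : (pending && !out.isEmpty) = true
          · rw [if_pos hcond] at hc
            have houtne : out ≠ [] := by
              simp only [Bool.and_eq_true, Bool.not_eq_true'] at hcond
              simpa [List.isEmpty_iff] using hcond.2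
            cases out with
            | nil => exact absurd rfl houtne
            | cons d ds =>
                simp only [List.cons_append, List.head?_cons, Option.mem_def,
                  Option.some.injEq] at hc
                exact hc ▸ h.1 d (by simp)
          · rw [if_neg hcond] at hc
            cases out with
            | nil =>
                simp only [List.nil_append, List.head?_cons, Option.mem_def,
                  Option.some.injEq] at hc
                exact hc ▸ hsp'
            | cons d ds =>
                simp only [List.cons_append, List.head?_cons, Option.mem_def,
                  Option.some.injEq] at hc
                exact hc ▸ h.1 d (by simp)
        · intro c hc
          rw [List.getLast?_concat] at hc
          simp only [Option.mem_def, Option.some.injEq] at hc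
          exact hc ▸ hsp'

lemma pv_strip_of_ends (l : List Char) (h : pvEndsOk l) : PySem.Chars.strip l = l := by
  unfold PySem.Chars.strip PySem.Chars.rstrip PySem.Chars.lstrip
  have hl : List.dropWhile PySem.Chars.isspace l = l := by
    cases l with
    | nil => rfl
    | cons c t =>
        have := h.1 c (by simp)
        simp [this]
  rw [hl]
  cases hr : l.reverse with
  | nil =>
      have h0 : l = [] := List.reverse_eq_nil_iff.mp hr
      subst h0; rfl
  | cons a s =>
      have hga : l.getLast? = some a := by rw [← List.head?_reverse, hr]; rfl
      have ha : PySem.Chars.isspace a = false := h.2 a (by rw [hga]; rfl)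
      have hd : List.dropWhile PySem.Chars.isspace (a :: s) = a :: s := by simp [ha]
      rw [hd, ← hr, List.reverse_reverse]

-- the two sanitizers agree
lemma pv_sanitize_eq (text : String) : pvSanitizeA text = pvCleanB text := by
  by_cases h : text = ""
  · subst h; decide
  · rw [← String.toList_inj]
    have hsep : (" " : String).toList = [' '] := by decide
    have hL : (("/\\?%*:|\"<>".toList).foldl
        (fun s c => PySem.Str.replace s (String.ofList [c]) "_") text).toList
          = text.toList.map (pvSub pvInvChars) := by
      rw [pv_strfold, pv_foldl_replace]; rfl
    have hscan : pvPureGo (text.toList.map (pvSub pvInvChars)) [] false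
        = PySem.Chars.join [' ']
            (PySem.Chars.split₀ (text.toList.map (pvSub pvInvChars))) := by
      unfold PySem.Chars.split₀
      exact pv_scan_go_eq _ [] [] [] false
        (by simp [PySem.Chars.join, List.intercalate]) (by simp) (by simp) (by simp)
    have hB : (pvCleanB text).toList
        = pvPureGo (text.toList.map (pvSub pvInvChars)) [] false := by
      unfold pvCleanB
      rw [String.toList_ofList, pv_clean_go_map]
    have hA : (pvSanitizeA text).toList
        = PySem.Chars.strip (PySem.Chars.join [' ']
            (PySem.Chars.split₀ (text.toList.map (pvSub pvInvChars)))) := by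
      unfold pvSanitizeA
      rw [if_neg h]
      rw [PySem.Str.toList_strip, PySem.Str.toList_join, hsep,
        PySem.Str.split₀_map_toList, hL]
    rw [hA, hB, hscan, ← hscan]
    rw [pv_strip_of_ends _ (pv_pure_ends _ [] false ⟨by simp, by simp⟩), hscan]

-- ===== VERDICT (by name: the statement is the Claim_ definition above) =====
theorem generate_standardized_filename_spec : Claim_equal_generate_standardized_filename := by
  intro title author _
  unfold Spec_generate_standardized_filename
  unfold generate_standardized_filename generate_standardized_filename_alt
  rw [pv_sanitize_eq title, pv_sanitize_eq author]
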